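-- pv_equiv track=rewrite | github.com/ekirton/poule | src/Poule/pipeline/context.py | _build_suffix_index
-- ===== SOURCE A (Python) =====
-- def _build_suffix_index(
--     inverted_index: dict[str, set[int]],
--     re_export_aliases: dict[str, str] | None = None,
-- ) -> dict[str, list[str]]:
--     """Build a reverse lookup from dot-separated suffixes to FQNs.
--
--     For each FQN like ``Coq.Init.Nat.add``, index all proper suffixes:
--     ``Init.Nat.add``, ``Nat.add``, ``add``.  Ambiguous suffixes (matching
--     multiple FQNs) retain all matches.
--
--     Re-export aliases contribute additional suffixes that map to the
--     **canonical** FQN (e.g., alias ``Coq.Lists.List.map`` → suffixes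
--     ``Lists.List.map``, ``List.map``, ``map``, all pointing to
--     ``Coq.Lists.ListDef.map``).
--     """
--     suffix_index: dict[str, list[str]] = {}
--     for fqn in inverted_index:
--         parts = fqn.split(".")
--         for k in range(1, len(parts)):
--             suffix = ".".join(parts[k:])
--             suffix_index.setdefault(suffix, []).append(fqn)
--
--     if re_export_aliases:
--         for alias_fqn, canonical_fqn in re_export_aliases.items():
--             parts = alias_fqn.split(".")
--             for k in range(1, len(parts)):
--                 suffix = ".".join(parts[k:])
--                 entry = suffix_index.setdefault(suffix, [])
--                 if canonical_fqn not in entry: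
--                     entry.append(canonical_fqn)
--
--     return suffix_index
-- ===== SOURCE B (Python) =====
-- def _suffixes(fqn):
--     """Proper dot-separated suffixes of ``fqn``, longest first.
--
--     Built right-to-left with a growing accumulator string, one
--     concatenation per suffix, instead of re-slicing and re-joining.
--     """
--     tails = []
--     acc = None
--     for part in reversed(fqn.split(".")[1:]):
--         acc = part if acc is None else part + "." + acc
--         tails.append(acc)
--     return tails[::-1]
--
--
-- def _build_suffix_index(
--     inverted_index,
--     re_export_aliases=None,
-- ):
--     # Stage 1: flatten everything into one event stream
--     # (suffix, target, dedup?) in processing order.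
--     events = []
--     for fqn in inverted_index:
--         events.extend((suffix, fqn, False) for suffix in _suffixes(fqn))
--     if re_export_aliases:
--         for alias_fqn, canonical_fqn in re_export_aliases.items():
--             events.extend(
--                 (suffix, canonical_fqn, True) for suffix in _suffixes(alias_fqn)
--             )
--
--     # Stage 2: replay the events into the index in one loop.
--     suffix_index = {}
--     for suffix, target, dedup in events:
--         entry = suffix_index.setdefault(suffix, [])
--         if not dedup or target not in entry:
--             entry.append(target)
--     return suffix_index
-- ===== Notes on version B (the rewrite author's own statement) =====
-- stated objective: alternative
-- what changed: B is a staged two-pass design: it first flattens both sources into one event stream of (suffix, target, dedup) triples -- with each suffix built right-to-left by a growing accumulator instead of A's per-index slice-and-rejoin -- and then replays all events into the dict in a single uniform loop, replacing A's two separate nested update loops.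
import Mathlib
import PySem

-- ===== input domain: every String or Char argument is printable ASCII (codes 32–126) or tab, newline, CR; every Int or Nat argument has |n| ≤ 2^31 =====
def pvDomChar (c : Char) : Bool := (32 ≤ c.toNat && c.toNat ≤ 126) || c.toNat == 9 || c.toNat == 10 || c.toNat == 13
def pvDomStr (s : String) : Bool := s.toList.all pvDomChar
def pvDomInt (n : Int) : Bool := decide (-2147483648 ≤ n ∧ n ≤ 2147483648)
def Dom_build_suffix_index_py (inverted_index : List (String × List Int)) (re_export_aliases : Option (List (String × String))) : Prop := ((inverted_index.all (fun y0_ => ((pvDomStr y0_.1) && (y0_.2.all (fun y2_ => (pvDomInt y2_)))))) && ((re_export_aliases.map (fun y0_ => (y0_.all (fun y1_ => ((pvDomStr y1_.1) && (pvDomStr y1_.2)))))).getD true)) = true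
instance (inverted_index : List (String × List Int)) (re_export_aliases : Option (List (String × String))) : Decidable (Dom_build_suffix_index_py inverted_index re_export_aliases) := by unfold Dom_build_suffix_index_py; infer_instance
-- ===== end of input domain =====

-- B stages the work differently: it flattens both sources into one (suffix, target, dedup)
-- event stream -- each suffix grown right-to-left by an accumulator instead of slice-and-rejoin --
-- and replays all events into the dict in a single uniform loop (alternative; same complexity).


-- ===== PORT A =====
-- the dict arguments are Python dicts: key iteration and lookup go through PySem.Dict.ofList
-- (first-occurrence key order, last value wins), exactly as Python sees them
def build_suffix_index_py (inverted_index : List (String × List Int)) (re_export_aliases : Option (List (String × String))) : List (String × List String) :=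
  let d1 : PySem.Dict String (List String) :=
    (PySem.Dict.ofList inverted_index).keys.foldl (fun d fqn =>
      let parts := (PySem.Str.split? fqn ".").getD []         -- sep "." ≠ "": split? is some
      (PySem.List.pyRange 1 (parts.length : Int) 1).foldl (fun d k =>
        let suffix := PySem.Str.join "." (PySem.List.slice parts (some k) none)
        d.modify suffix [] (fun e => e ++ [fqn])) d)          -- setdefault(suffix, []).append(fqn)
      PySem.Dict.empty
  let d2 : PySem.Dict String (List String) :=
    match re_export_aliases with
    | none => d1
    | some aliases =>
      let ad := PySem.Dict.ofList aliases
      if ad.items = [] then d1 else                           -- 'if re_export_aliases:' truthiness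
      ad.items.foldl (fun d p =>
        let parts := (PySem.Str.split? p.1 ".").getD []
        (PySem.List.pyRange 1 (parts.length : Int) 1).foldl (fun d k =>
          let suffix := PySem.Str.join "." (PySem.List.slice parts (some k) none)
          let d' := d.setdefault suffix []
          if p.2 ∈ d'.getD suffix [] then d'
          else d'.modify suffix [] (fun e => e ++ [p.2])) d) d1
  d2.items

-- ===== PORT B =====
-- Source B's _suffixes: fold over reversed(parts[1:]) growing an accumulator, then reverse
def suffixes_alt (fqn : String) : List String :=
  let tails := ((PySem.List.slice ((PySem.Str.split? fqn ".").getD []) (some 1) none).reverse).foldl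
    (fun (st : Option String × List String) part =>
      let acc := match st.1 with | none => part | some a => part ++ "." ++ a
      (some acc, st.2 ++ [acc])) (none, [])
  tails.2.reverse

def build_suffix_index_py_alt (inverted_index : List (String × List Int)) (re_export_aliases : Option (List (String × String))) : List (String × List String) :=
  -- stage 1: the event stream (suffix, target, dedup?)
  let ev1 : List (String × String × Bool) :=
    (PySem.Dict.ofList inverted_index).keys.foldl (fun ev fqn =>
      ev ++ (suffixes_alt fqn).map (fun s => (s, fqn, false))) []
  let ev2 : List (String × String × Bool) :=
    match re_export_aliases with
    | none => ev1
    | some aliases =>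
      let ad := PySem.Dict.ofList aliases
      if ad.items = [] then ev1 else                          -- 'if re_export_aliases:' truthiness
      ad.items.foldl (fun ev p =>
        ev ++ (suffixes_alt p.1).map (fun s => (s, p.2, true))) ev1
  -- stage 2: replay the events in one loop
  let d : PySem.Dict String (List String) :=
    ev2.foldl (fun d e =>
      let d' := d.setdefault e.1 []
      if !e.2.2 || e.2.1 ∉ d'.getD e.1 [] then d'.modify e.1 [] (fun l => l ++ [e.2.1])
      else d') PySem.Dict.empty
  d.items

-- ===== PRECONDITION & SPEC =====
def Spec_build_suffix_index_py (inverted_index : List (String × List Int)) (re_export_aliases : Option (List (String × String))) (out : List (String × List String)) : Prop := out = build_suffix_index_py_alt inverted_index re_export_aliases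
instance (inverted_index : List (String × List Int)) (re_export_aliases : Option (List (String × String))) (out : List (String × List String)) : Decidable (Spec_build_suffix_index_py inverted_index re_export_aliases out) := by unfold Spec_build_suffix_index_py; infer_instance

-- ===== CLAIM (what is proved, stated in full; the proofs are below) =====
def Claim_equal_build_suffix_index_py : Prop := ∀ (inverted_index : List (String × List Int)) (re_export_aliases : Option (List (String × String))), Dom_build_suffix_index_py inverted_index re_export_aliases → Spec_build_suffix_index_py inverted_index re_export_aliases (build_suffix_index_py inverted_index re_export_aliases)

-- ===== LEMMAS AND PROOFS =====

-- the canonical suffix list both sides are shown to produce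
def sufSpec (parts : List String) : List String :=
  (List.range (parts.drop 1).length).map (fun j => PySem.Str.join "." ((parts.drop 1).drop j))

-- lifts PySem.Chars.join_singleton to String
theorem strJoin_singleton (p : String) : PySem.Str.join "." [p] = p := by
  rw [← String.toList_inj]
  simp [PySem.Str.join, PySem.Chars.join_singleton]

-- lifts PySem.Chars.join_cons_cons to String
theorem strJoin_cons_cons (p q : String) (r : List String) :
    PySem.Str.join "." (p :: q :: r) = p ++ "." ++ PySem.Str.join "." (q :: r) := by
  rw [← String.toList_inj]
  simp [PySem.Str.join, PySem.Chars.join_cons_cons]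

-- B's accumulator fold: the accumulator is the join of all parts seen, the output
-- collects the joins of the tails, shortest first
theorem tails_fold_spec (ps : List String) :
    ps.reverse.foldl
      (fun (st : Option String × List String) part =>
        let acc := match st.1 with | none => part | some a => part ++ "." ++ a
        (some acc, st.2 ++ [acc])) (none, [])
    = ((if ps = [] then none else some (PySem.Str.join "." ps)),
       ((List.range ps.length).map (fun j => PySem.Str.join "." (ps.drop j))).reverse) := by
  induction ps with
  | nil => simp
  | cons p rest ih =>
    rw [List.reverse_cons, List.foldl_append, ih]
    cases rest with
    | nil => simp [strJoin_singleton]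
    | cons q r =>
      simp only [List.foldl_cons, List.foldl_nil, reduceCtorEq, if_false]
      rw [show (p :: q :: r).length = (q :: r).length + 1 from rfl, List.range_succ_eq_map]
      simp [strJoin_cons_cons, Function.comp_def, List.drop_succ_cons]

-- hence B's helper produces the canonical suffix list
theorem suffixes_alt_eq (fqn : String) :
    suffixes_alt fqn = sufSpec ((PySem.Str.split? fqn ".").getD []) := by
  unfold suffixes_alt sufSpec
  rw [PySem.List.slice_from _ (by omega : (0:Int) ≤ 1)]
  rw [show ((1 : Int)).toNat = 1 from rfl, tails_fold_spec]
  simp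

-- A's index loop enumerates exactly the canonical suffix list
theorem a_suffixes_eq (parts : List String) :
    (PySem.List.pyRange 1 (parts.length : Int) 1).map
        (fun k => PySem.Str.join "." (PySem.List.slice parts (some k) none))
      = sufSpec parts := by
  cases parts with
  | nil => simp [PySem.List.pyRange_one_eq_nil, sufSpec]
  | cons p ps =>
    unfold sufSpec
    rw [PySem.List.pyRange_one, List.map_map]
    have hlen : (((p :: ps).length : Int) - 1).toNat = ps.length := by simp
    rw [hlen]
    refine List.map_congr_left ?_
    intro j hj
    have h0 : (0 : Int) ≤ 1 + (j : Int) := by omega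
    simp only [Function.comp, PySem.List.slice_from _ h0]
    have hT : ((1 : Int) + (j : Int)).toNat = j + 1 := by omega
    rw [hT]
    rfl

-- A's per-suffix inner index loop is the fold of the update over the canonical suffix list
theorem foldl_sufs (parts : List String)
    (g : PySem.Dict String (List String) → String → PySem.Dict String (List String))
    (d : PySem.Dict String (List String)) :
    (PySem.List.pyRange 1 (parts.length : Int) 1).foldl
        (fun d k => g d (PySem.Str.join "." (PySem.List.slice parts (some k) none))) d
      = (sufSpec parts).foldl g d := by
  rw [← a_suffixes_eq parts, List.foldl_map]

-- setdefault-then-modify at the same key with the same default collapses to modify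
theorem setdefault_modify (d : PySem.Dict String (List String)) (k : String)
    (f : List String → List String) :
    (d.setdefault k []).modify k [] f = d.modify k [] f := by
  by_cases h : d.contains k = true
  · rw [PySem.Dict.setdefault_of_contains d [] h]
  · have h' : d.contains k = false := by simpa using h
    rw [PySem.Dict.setdefault_of_not_contains d [] h']
    show (d.insert k []).insert k (f ((d.insert k []).getD k [])) = d.insert k (f (d.getD k []))
    rw [PySem.Dict.getD_insert_self, PySem.Dict.insert_insert_self,
      PySem.Dict.getD_of_not_contains d [] h']

-- replaying B-events with dedup = false is A's unconditional append
theorem upd_false (d : PySem.Dict String (List String)) (s fqn : String) :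
    (let d' := d.setdefault s []
     if !(false : Bool) || fqn ∉ d'.getD s [] then d'.modify s [] (fun l => l ++ [fqn])
     else d') = d.modify s [] (fun e => e ++ [fqn]) := by
  simp [setdefault_modify]

-- replaying B-events with dedup = true is A's guarded append
theorem upd_true (d : PySem.Dict String (List String)) (s c : String) :
    (let d' := d.setdefault s []
     if !(true : Bool) || c ∉ d'.getD s [] then d'.modify s [] (fun l => l ++ [c])
     else d')
    = (let d' := d.setdefault s []
       if c ∈ d'.getD s [] then d' else d'.modify s [] (fun e => e ++ [c])) := by
  by_cases h : c ∈ (d.setdefault s []).getD s []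
  · simp [h]
  · simp [h]

-- ===== VERDICT (by name: the statement is the Claim_ definition above) =====
theorem build_suffix_index_py_spec : Claim_equal_build_suffix_index_py := by
  intro inv ra _
  unfold Spec_build_suffix_index_py build_suffix_index_py build_suffix_index_py_alt
  -- inner abbreviations
  set updE : PySem.Dict String (List String) → String × String × Bool → PySem.Dict String (List String) :=
    fun d e =>
      let d' := d.setdefault e.1 []
      if !e.2.2 || e.2.1 ∉ d'.getD e.1 [] then d'.modify e.1 [] (fun l => l ++ [e.2.1])
      else d' with hupdE
  -- the B event list for one key folds like A's inner loop
  have hkey : ∀ (fqn : String) (d : PySem.Dict String (List String)),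
      ((suffixes_alt fqn).map (fun s => (s, fqn, false))).foldl updE d
        = (sufSpec ((PySem.Str.split? fqn ".").getD [])).foldl
            (fun d suffix => d.modify suffix [] (fun e => e ++ [fqn])) d := by
    intro fqn d
    rw [List.foldl_map, suffixes_alt_eq]
    refine PySem.List.foldl_congr_mem _ _ _ _ ?_
    intro d s _
    exact upd_false d s fqn
  have halias : ∀ (p : String × String) (d : PySem.Dict String (List String)),
      ((suffixes_alt p.1).map (fun s => (s, p.2, true))).foldl updE d
        = (sufSpec ((PySem.Str.split? p.1 ".").getD [])).foldl
            (fun d suffix =>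
              let d' := d.setdefault suffix []
              if p.2 ∈ d'.getD suffix [] then d'
              else d'.modify suffix [] (fun e => e ++ [p.2])) d := by
    intro p d
    rw [List.foldl_map, suffixes_alt_eq]
    refine PySem.List.foldl_congr_mem _ _ _ _ ?_
    intro d s _
    exact upd_true d s p.2
  -- stage-1 lists are flatMaps; replaying them is the nested fold
  have hflat : ∀ (keys : List String) (d : PySem.Dict String (List String)),
      (keys.foldl (fun ev fqn => ev ++ (suffixes_alt fqn).map (fun s => (s, fqn, false))) []).foldl updE d
        = keys.foldl (fun d fqn =>
            (sufSpec ((PySem.Str.split? fqn ".").getD [])).foldl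
              (fun d suffix => d.modify suffix [] (fun e => e ++ [fqn])) d) d := by
    intro keys d
    rw [PySem.List.foldl_append_eq_flatMap, List.nil_append, List.foldl_flatMap]
    exact PySem.List.foldl_congr_mem _ _ _ _ (fun d fqn _ => hkey fqn d)
  -- A's first dict equals B's replay of the first event block
  have hd1 : ∀ (d0 : PySem.Dict String (List String)),
      ((PySem.Dict.ofList inv).keys.foldl
          (fun ev fqn => ev ++ (suffixes_alt fqn).map (fun s => (s, fqn, false))) []).foldl updE d0
        = (PySem.Dict.ofList inv).keys.foldl (fun d fqn =>
            (PySem.List.pyRange 1 ((((PySem.Str.split? fqn ".").getD []).length : Int)) 1).foldl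
              (fun d k =>
                d.modify (PySem.Str.join "." (PySem.List.slice ((PySem.Str.split? fqn ".").getD []) (some k) none)) []
                  (fun e => e ++ [fqn])) d) d0 := by
    intro d0
    rw [hflat]
    exact (PySem.List.foldl_congr_mem _ _ _ _ (fun d fqn _ =>
      (foldl_sufs ((PySem.Str.split? fqn ".").getD []) _ d).symm))
  cases ra with
  | none => exact congrArg PySem.Dict.items (hd1 PySem.Dict.empty).symm
  | some aliases =>
    by_cases hempty : (PySem.Dict.ofList aliases).items = []
    · simp only [hempty, if_true]
      exact congrArg PySem.Dict.items (hd1 PySem.Dict.empty).symm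
    · simp only [hempty, if_false]
      refine congrArg PySem.Dict.items ?_
      refine Eq.symm ?_
      rw [PySem.List.foldl_append_eq_flatMap, List.foldl_append, List.foldl_flatMap,
        hd1 PySem.Dict.empty]
      refine PySem.List.foldl_congr_mem _ _ _ _ ?_
      intro d p _
      rw [halias p d]
      exact (foldl_sufs ((PySem.Str.split? p.1 ".").getD [])
        (fun d suffix =>
          let d' := d.setdefault suffix []
          if p.2 ∈ d'.getD suffix [] then d'
          else d'.modify suffix [] (fun e => e ++ [p.2])) d).symm
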